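-- pv_equiv track=rewrite | github.com/abckristinaa/Python_workshop | Priority_queue.py | extractMax
-- ===== SOURCE A (Python) =====
-- def extractMax(h):
--     # Извлечение элемента с максимальным приоритетом (первый элемент в очереди).
--     # Мах элемент просеивается вниз до конца через обмен с наибольшим из детей,
--     # если после просеивания он не является самым последним элементом, то он меняется местами с самым последним.
--     # для узла, на место которого он встал выполняется проверка как при добавлении элемента
--     i = 1
--     while i * 2 + 1 < len(h):
--         left = i * 2
--         right = i * 2 + 1
--         if h[right] >= h[left]:
--             h[right], h[i] = h[i], h[right]
--             i = right
--         else: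
--             h[left], h[i] = h[i], h[left]
--             i = left
--     if h[i] != h[-1]:
--         h[i], h[-1] = h[-1], h[i]
--         node = i // 2
--         while h[node] < h[i]:
--             h[node], h[i] = h[i], h[node]
--             i = node
--             node = i // 2
--     return h.pop(-1)
-- ===== SOURCE B (Python) =====
-- def extractMax(h):
--     # Standard top-down extract-max for a 1-based binary max-heap stored in h
--     # (h[0] is an unused slot): save the root, move the last element to the
--     # root and sift it down with one early-stopping pass.
--     # NOTE: h is mutated in place, but the resulting array may differ from the
--     # original implementation's; only the returned value is claimed equal.
--     mx = h[1]
--     last = h.pop(-1)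
--     if len(h) > 1:
--         h[1] = last
--         i = 1
--         while True:
--             left, right = i * 2, i * 2 + 1
--             if right < len(h) and h[right] >= h[left]:
--                 child = right
--             elif left < len(h):
--                 child = left
--             else:
--                 break
--             if h[i] < h[child]:
--                 h[i], h[child] = h[child], h[i]
--                 i = child
--             else:
--                 break
--     return mx
-- ===== Notes on version B (the rewrite author's own statement) =====
-- stated objective: idiomatic
-- what changed: Replaces Floyd's two-pass extract (sift the root value unconditionally to a leaf, swap with the last slot, sift back up) with the standard single early-stopping top-down sift: save the root, move the popped last element to the root and swap it downward with the larger child only while it is smaller. Equivalence is about the RETURN value only: both mutate h in place but may leave a different (both valid) heap array.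
import Mathlib
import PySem

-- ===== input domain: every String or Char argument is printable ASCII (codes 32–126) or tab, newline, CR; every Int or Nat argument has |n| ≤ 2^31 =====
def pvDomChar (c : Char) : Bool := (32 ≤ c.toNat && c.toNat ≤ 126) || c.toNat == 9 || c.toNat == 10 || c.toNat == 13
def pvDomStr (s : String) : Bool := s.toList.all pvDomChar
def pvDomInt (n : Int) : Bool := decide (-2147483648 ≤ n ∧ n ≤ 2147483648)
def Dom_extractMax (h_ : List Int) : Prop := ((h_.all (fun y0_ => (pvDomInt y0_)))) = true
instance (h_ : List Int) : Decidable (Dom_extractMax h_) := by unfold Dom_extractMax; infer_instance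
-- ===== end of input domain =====

-- B replaces A's two-pass extract (sift root to a leaf, swap with last, sift up) with the
-- standard single early-stopping top-down sift; both mutate h in place (possibly leaving
-- different valid heap arrays) — only the RETURN value is claimed equal.

-- ===== PORT A =====
-- while i*2+1 < len(h): swap h[i] with the larger child, descend (unconditionally)
def extractMaxLoop1 (fuel : Nat) (h : List Int) (i : Nat) : List Int × Nat :=
  match fuel with
  | 0 => (h, i)
  | fuel + 1 =>
    if i * 2 + 1 < h.length then
      let left := i * 2
      let right := i * 2 + 1
      if PySem.List.pyGetD h (right : Int) 0 ≥ PySem.List.pyGetD h (left : Int) 0 then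
        extractMaxLoop1 fuel
          ((h.set right (PySem.List.pyGetD h (i : Int) 0)).set i (PySem.List.pyGetD h (right : Int) 0))
          right
      else
        extractMaxLoop1 fuel
          ((h.set left (PySem.List.pyGetD h (i : Int) 0)).set i (PySem.List.pyGetD h (left : Int) 0))
          left
    else (h, i)

-- while h[node] < h[i]: swap and move up (node = i // 2, recomputed each turn)
def extractMaxLoop2 (fuel : Nat) (h : List Int) (i : Nat) : List Int × Nat :=
  match fuel with
  | 0 => (h, i)
  | fuel + 1 =>
    let node := i / 2
    if PySem.List.pyGetD h (node : Int) 0 < PySem.List.pyGetD h (i : Int) 0 then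
      extractMaxLoop2 fuel
        ((h.set node (PySem.List.pyGetD h (i : Int) 0)).set i (PySem.List.pyGetD h (node : Int) 0))
        node
    else (h, i)

-- the `if h[i] != h[-1]: swap with last; sift up` block of A
def extractMaxStep2 (h : List Int) (i : Nat) : List Int :=
  if PySem.List.pyGetD h (i : Int) 0 ≠ PySem.List.pyGetD h (-1) 0 then
    (extractMaxLoop2 h.length
      ((h.set i (PySem.List.pyGetD h (-1) 0)).set (h.length - 1) (PySem.List.pyGetD h (i : Int) 0))
      i).1
  else h

def extractMax (h_ : List Int) : Int :=
  match PySem.List.pop?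
      (extractMaxStep2 (extractMaxLoop1 h_.length h_ 1).1 (extractMaxLoop1 h_.length h_ 1).2)
      (-1) with
  | some r => r.1
  | none => 0       -- unreachable under Pre_ (Python raises IndexError before this point)

-- ===== PORT B =====
-- while True: child := right if it exists and h[right] >= h[left], else left if it exists,
-- else break; if h[i] < h[child] swap and descend else break
def extractMaxAltSift (fuel : Nat) (h : List Int) (i : Nat) : List Int :=
  match fuel with
  | 0 => h
  | fuel + 1 =>
    let left := i * 2
    let right := i * 2 + 1
    let child? : Option Nat :=
      if right < h.length ∧ PySem.List.pyGetD h (right : Int) 0 ≥ PySem.List.pyGetD h (left : Int) 0 then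
        some right
      else if left < h.length then some left
      else none
    match child? with
    | none => h
    | some child =>
      if PySem.List.pyGetD h (i : Int) 0 < PySem.List.pyGetD h (child : Int) 0 then
        extractMaxAltSift fuel
          ((h.set i (PySem.List.pyGetD h (child : Int) 0)).set child (PySem.List.pyGetD h (i : Int) 0))
          child
      else h

def extractMax_alt (h_ : List Int) : Int :=
  match PySem.List.pyGet? h_ 1 with        -- mx = h[1] (IndexError if len < 2)
  | none => 0                              -- unreachable under Pre_
  | some mx =>
    match PySem.List.pop? h_ (-1) with     -- last = h.pop(-1)
    | none => mx                           -- unreachable under Pre_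
    | some r =>
      let h := r.2
      let _ := if 1 < h.length then extractMaxAltSift h.length (h.set 1 r.1) 1 else h
      mx

-- ===== PRECONDITION & SPEC =====
-- Pre_ excludes exactly the inputs on which Python A raises IndexError (h[1] with len(h) < 2).
def Pre_extractMax (h_ : List Int) : Prop := 2 ≤ h_.length
instance (h_ : List Int) : Decidable (Pre_extractMax h_) := by unfold Pre_extractMax; infer_instance
def pvWitness_extractMax : List Int := [0, 5, 3, 1]

def Spec_extractMax (h_ : List Int) (out : Int) : Prop := out = extractMax_alt h_
instance (h_ : List Int) (out : Int) : Decidable (Spec_extractMax h_ out) := by unfold Spec_extractMax; infer_instance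

-- ===== CLAIM (what is proved, stated in full; the proofs are below) =====
def Claim_equal_extractMax : Prop := ∀ (h_ : List Int), Dom_extractMax h_ → Pre_extractMax h_ → Spec_extractMax h_ (extractMax h_)

-- ===== LEMMAS AND PROOFS =====

-- getD after a single set, with the in-range/out-of-range case split made explicit
theorem pvGetD_set (l : List Int) (i j : Nat) (v : Int) :
    (l.set i v).getD j 0 = if i = j ∧ i < l.length then v else l.getD j 0 := by
  simp only [List.getD_eq_getElem?_getD, List.getElem?_set]
  split_ifs with h1 h2 h3 h3 <;> simp_all <;> omega

-- Loop-1 invariant: length preserved, 1 ≤ i' < len, and h'[i'] carries the old h[i].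
theorem pvLoop1_inv (fuel : Nat) : ∀ (h : List Int) (i : Nat), 1 ≤ i → i < h.length →
    (extractMaxLoop1 fuel h i).1.length = h.length ∧
    1 ≤ (extractMaxLoop1 fuel h i).2 ∧
    (extractMaxLoop1 fuel h i).2 < h.length ∧
    (extractMaxLoop1 fuel h i).1.getD (extractMaxLoop1 fuel h i).2 0 = h.getD i 0 := by
  induction fuel with
  | zero => intro h i h1 h2; simp [extractMaxLoop1, h1, h2]
  | succ fuel ih =>
    intro h i h1 h2
    rw [extractMaxLoop1]
    simp only [PySem.List.pyGetD_natCast]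
    by_cases hg : i * 2 + 1 < h.length
    · rw [if_pos hg]
      by_cases hc : h.getD (i * 2 + 1) 0 ≥ h.getD (i * 2) 0
      · rw [if_pos hc]
        have := ih ((h.set (i * 2 + 1) (h.getD i 0)).set i (h.getD (i * 2 + 1) 0)) (i * 2 + 1)
          (by omega) (by simpa using hg)
        simp only [List.length_set] at this ⊢
        refine ⟨this.1, this.2.1, this.2.2.1, ?_⟩
        rw [this.2.2.2, pvGetD_set, pvGetD_set]
        have hne : ¬ (i = i * 2 + 1) := by omega
        simp [hne, List.length_set, hg]
      · rw [if_neg hc]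
        have := ih ((h.set (i * 2) (h.getD i 0)).set i (h.getD (i * 2) 0)) (i * 2)
          (by omega) (by simp only [List.length_set]; omega)
        simp only [List.length_set] at this ⊢
        refine ⟨this.1, this.2.1, this.2.2.1, ?_⟩
        rw [this.2.2.2, pvGetD_set, pvGetD_set]
        have hne : ¬ (i = i * 2) := by omega
        have hlt2 : i * 2 < h.length := by omega
        simp [hne, List.length_set, hlt2]
    · rw [if_neg hg]
      simp [h1, h2]

-- Loop-2 invariant: as long as i stays strictly below the last index, the sift-up
-- preserves both the length and the element in the last slot.
theorem pvLoop2_inv (fuel : Nat) : ∀ (h : List Int) (i : Nat), i + 1 < h.length →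
    (extractMaxLoop2 fuel h i).1.length = h.length ∧
    (extractMaxLoop2 fuel h i).1.getD (h.length - 1) 0 = h.getD (h.length - 1) 0 := by
  induction fuel with
  | zero => intro h i hi; simp [extractMaxLoop2]
  | succ fuel ih =>
    intro h i hi
    rw [extractMaxLoop2]
    simp only [PySem.List.pyGetD_natCast]
    by_cases hc : h.getD (i / 2) 0 < h.getD i 0
    · rw [if_pos hc]
      have hnode : i / 2 ≤ i := Nat.div_le_self i 2
      have := ih ((h.set (i / 2) (h.getD i 0)).set i (h.getD (i / 2) 0)) (i / 2)
        (by simp only [List.length_set]; omega)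
      simp only [List.length_set] at this ⊢
      refine ⟨this.1, ?_⟩
      rw [this.2, pvGetD_set, pvGetD_set]
      rw [if_neg (by omega), if_neg (by omega)]
    · rw [if_neg hc]
      exact ⟨rfl, rfl⟩

-- pop(-1) on a nonempty list returns its last element (stated via getD)
theorem pvPop_neg_one (l : List Int) (hl : l ≠ []) :
    PySem.List.pop? l (-1) = some (l.getD (l.length - 1) 0, l.dropLast) := by
  have h1 : l.dropLast ++ [l.getLast hl] = l := List.dropLast_append_getLast hl
  have h2 := PySem.List.pop?_last l.dropLast (l.getLast hl)
  rw [h1] at h2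
  have h0 : 0 < l.length := List.length_pos_of_ne_nil hl
  have h3 : l.getD (l.length - 1) 0 = l.getLast hl := by
    rw [List.getLast_eq_getElem, List.getD_eq_getElem?_getD,
      List.getElem?_eq_getElem (by omega)]
    rfl
  rw [h2, h3]

-- The swap-with-last-then-sift-up block keeps the length and leaves the old h[i] in the last slot.
theorem pvStep2_spec (h : List Int) (i : Nat) (hlen : 2 ≤ h.length) (hi : i < h.length) :
    (extractMaxStep2 h i).length = h.length ∧
    (extractMaxStep2 h i).getD (h.length - 1) 0 = h.getD i 0 := by
  have hne : h ≠ [] := by intro hcon; rw [hcon] at hlen; simp at hlen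
  unfold extractMaxStep2
  have hlast : PySem.List.pyGetD h (-1) 0 = h.getD (h.length - 1) 0 := by
    rw [PySem.List.pyGetD_neg_one h 0 hne, List.getLast_eq_getElem,
      List.getD_eq_getElem?_getD, List.getElem?_eq_getElem (by omega)]
    rfl
  simp only [PySem.List.pyGetD_natCast, hlast]
  by_cases hcase : h.getD i 0 = h.getD (h.length - 1) 0
  · rw [if_neg (by simpa using hcase)]
    exact ⟨rfl, hcase.symm⟩
  · rw [if_pos (by simpa using hcase)]
    have hine : i ≠ h.length - 1 := by
      intro hcon; exact hcase (by rw [hcon])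
    have hilt : i + 1 < h.length := by omega
    set h2 := (h.set i (h.getD (h.length - 1) 0)).set (h.length - 1) (h.getD i 0) with hh2
    have hl2 : h2.length = h.length := by simp [hh2]
    have hget2 : h2.getD (h.length - 1) 0 = h.getD i 0 := by
      rw [hh2, pvGetD_set]
      split_ifs with hcond
      · rfl
      · exact absurd ⟨rfl, by simp only [List.length_set]; omega⟩ hcond
    obtain ⟨ha, hb⟩ := pvLoop2_inv h.length h2 i (by omega)
    rw [hl2] at ha
    rw [hl2] at hb
    exact ⟨ha, by rw [hb, hget2]⟩

-- A returns the original h[1]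
theorem pvA_eq (h_ : List Int) (hp : 2 ≤ h_.length) : extractMax h_ = h_.getD 1 0 := by
  unfold extractMax
  obtain ⟨hlen, hi1, hilt, hval⟩ := pvLoop1_inv h_.length h_ 1 (le_refl 1) (by omega)
  obtain ⟨ha, hb⟩ := pvStep2_spec (extractMaxLoop1 h_.length h_ 1).1
    (extractMaxLoop1 h_.length h_ 1).2 (by rw [hlen]; exact hp) (by rw [hlen]; exact hilt)
  have hne : extractMaxStep2 (extractMaxLoop1 h_.length h_ 1).1 (extractMaxLoop1 h_.length h_ 1).2 ≠ [] := by
    intro hcon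
    rw [hcon] at ha
    simp at ha
    omega
  rw [pvPop_neg_one _ hne]
  simp only []
  rw [ha, hb, hval]

-- B returns the original h[1]
theorem pvB_eq (h_ : List Int) (hp : 2 ≤ h_.length) : extractMax_alt h_ = h_.getD 1 0 := by
  unfold extractMax_alt
  have h1 : PySem.List.pyGet? h_ 1 = some (h_.getD 1 0) := by
    have hlt : 1 < h_.length := by omega
    rw [show (1 : Int) = ((1 : Nat) : Int) by norm_num, PySem.List.pyGet?_ofNat h_ 1 hlt,
      List.getD_eq_getElem?_getD, List.getElem?_eq_getElem hlt]
    rfl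
  rw [h1]
  cases PySem.List.pop? h_ (-1) <;> simp

-- ===== VERDICT (by name: the statement is the Claim_ definition above) =====
theorem extractMax_spec : Claim_equal_extractMax := by
  intro h_ _ hpre
  unfold Spec_extractMax
  rw [pvA_eq h_ hpre, pvB_eq h_ hpre]
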